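-- pv_equiv track=rewrite | github.com/dave-sbs/cs466 | code/fetch_raw_gutenberg.py | count_stanzas
-- ===== SOURCE A (Python) =====
-- def count_stanzas(text_lines: list[str]) -> int:
--     """Blank-line-separated stanzas (non-empty groups)."""
--     stanzas = 0
--     current = False
--     for line in text_lines:
--         if line.strip() == "":
--             if current:
--                 stanzas += 1
--                 current = False
--         else:
--             current = True
--     if current:
--         stanzas += 1
--     return stanzas
-- ===== SOURCE B (Python) =====
-- from itertools import groupby
--
--
-- def count_stanzas(text_lines: list[str]) -> int:
--     """Blank-line-separated stanzas (non-empty groups)."""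
--     return sum(1 for is_blank, _ in groupby(text_lines, key=lambda l: l.strip() == "")
--                if not is_blank)
-- ===== Notes on version B (the rewrite author's own statement) =====
-- stated objective: idiomatic
-- what changed: Replaced the manual edge-detection flag loop by itertools.groupby run-grouping on the blank/non-blank key, counting the non-blank runs.
import Mathlib
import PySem

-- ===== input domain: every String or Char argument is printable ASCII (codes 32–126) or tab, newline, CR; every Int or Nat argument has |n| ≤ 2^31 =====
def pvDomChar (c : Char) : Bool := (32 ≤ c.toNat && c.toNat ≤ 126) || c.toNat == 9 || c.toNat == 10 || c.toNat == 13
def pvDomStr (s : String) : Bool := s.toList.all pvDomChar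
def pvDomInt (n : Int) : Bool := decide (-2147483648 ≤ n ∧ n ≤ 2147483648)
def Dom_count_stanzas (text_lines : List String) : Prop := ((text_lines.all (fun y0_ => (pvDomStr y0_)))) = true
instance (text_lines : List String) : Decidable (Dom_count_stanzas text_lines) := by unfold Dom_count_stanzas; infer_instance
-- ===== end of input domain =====

-- B replaces A's manual edge-detection flag loop by groupby-style run grouping
-- (collapse adjacent equal blank/non-blank keys, count the non-blank runs); idiomatic, same cost.

-- ===== PORT A =====
-- the loop body: state = (stanzas, current)
def pvLoopA (st : Int × Bool) (line : String) : Int × Bool :=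
  if PySem.Str.strip line == "" then
    if st.2 then (st.1 + 1, false) else st
  else
    (st.1, true)

def count_stanzas (text_lines : List String) : Int :=
  let st := text_lines.foldl pvLoopA (0, false)
  if st.2 then st.1 + 1 else st.1

-- ===== PORT B =====
-- groupby's run keys: adjacent-duplicate-collapsed list of the key values
def pvGroupKeys : List Bool → List Bool
  | [] => []
  | [b] => [b]
  | b :: b' :: rest =>
      if b == b' then pvGroupKeys (b' :: rest) else b :: pvGroupKeys (b' :: rest)

def count_stanzas_alt (text_lines : List String) : Int :=
  ((pvGroupKeys (text_lines.map (fun l => PySem.Str.strip l == ""))).countP (fun k => !k) : Nat)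

-- ===== PRECONDITION & SPEC =====
def Spec_count_stanzas (text_lines : List String) (out : Int) : Prop := out = count_stanzas_alt text_lines
instance (text_lines : List String) (out : Int) : Decidable (Spec_count_stanzas text_lines out) := by unfold Spec_count_stanzas; infer_instance

-- ===== CLAIM (what is proved, stated in full; the proofs are below) =====
def Claim_equal_count_stanzas : Prop := ∀ (text_lines : List String), Dom_count_stanzas text_lines → Spec_count_stanzas text_lines (count_stanzas text_lines)

-- ===== LEMMAS AND PROOFS =====

-- ===== VERDICT (by name: the statement is the Claim_ definition above) =====
-- g bs cur = number of stanzas the rest of A's loop will still add, given flag cur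
def pvG : List Bool → Bool → Nat
  | [], cur => if cur then 1 else 0
  | b :: bs, cur => if b then (if cur then 1 else 0) + pvG bs false else pvG bs true

theorem pvLoopA_eq_g (bs : List String) (s : Int) (cur : Bool) :
    (let st := bs.foldl pvLoopA (s, cur);
     if st.2 then st.1 + 1 else st.1) = s + (pvG (bs.map (fun l => PySem.Str.strip l == "")) cur : Nat) := by
  induction bs generalizing s cur with
  | nil => cases cur <;> simp [pvG]
  | cons x xs ih =>
      simp only [List.foldl_cons, List.map_cons, pvLoopA, pvG]
      by_cases hx : PySem.Str.strip x == ""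
      · cases cur <;> simp [hx, ih] <;> push_cast <;> ring
      · simp [hx, ih]

theorem pvGroupKeys_count (b : Bool) (bs : List Bool) :
    (pvGroupKeys (b :: bs)).countP (fun k => !k) = pvG (b :: bs) false := by
  induction bs generalizing b with
  | nil => cases b <;> simp [pvGroupKeys, pvG, List.countP, List.countP.go]
  | cons b' rest ih =>
      have hg : pvG (false :: rest) true = pvG (false :: rest) false := by simp [pvG]
      cases b <;> cases b'
      · -- b = false, b' = false : collapse
        have := ih false
        simp only [pvGroupKeys, beq_self_eq_true, if_true] at *
        rw [this]; simp [pvG]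
      · -- b = false, b' = true : new non-blank run counted
        simp only [pvGroupKeys, show (false == true) = false from rfl, Bool.false_eq_true,
          if_false, List.countP_cons, Bool.not_false]
        rw [ih true]; simp [pvG]; omega
      · -- b = true, b' = false
        simp only [pvGroupKeys, show (true == false) = false from rfl, Bool.false_eq_true,
          if_false, List.countP_cons, Bool.not_true]
        rw [ih false, ← hg]; simp [pvG]
      · -- b = true, b' = true : collapse
        simp only [pvGroupKeys, beq_self_eq_true, if_true]
        rw [ih true]; simp [pvG]

theorem count_stanzas_spec : Claim_equal_count_stanzas := by
  intro text_lines _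
  unfold Spec_count_stanzas count_stanzas count_stanzas_alt
  rw [pvLoopA_eq_g]
  cases h : text_lines.map (fun l => PySem.Str.strip l == "") with
  | nil => simp [pvGroupKeys, pvG]
  | cons b bs => rw [pvGroupKeys_count]; simp
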